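-- pv_equiv track=rewrite | github.com/ss-won/ps_study | ss-won/programmers/60057.py | Compression
-- ===== SOURCE A (Python) =====
-- def Compression(size, s):
--     cur, rep, res = s[0:size], 1, ""
--     i = size
--     while i < len(s):
--         if s[i:i+size] != cur:
--             if rep > 1:
--                 res += str(rep)+cur
--             else:
--                 res += cur
--             cur, rep = s[i:i+size], 1
--         else:
--             rep += 1
--         i += size
--     if rep != 1:
--         res += str(rep) + cur
--     else:
--         res += cur
--     res += s[i:]
--     return res
-- ===== SOURCE B (Python) =====
-- def Compression(size, s):
--     # split into fixed-size blocks first, then encode run-at-a-time: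
--     # find each run's length up front, emit the whole run, and jump past it
--     blocks = [s[i:i+size] for i in range(0, len(s), size)]
--     parts = []
--     rest = blocks
--     while rest:
--         head = rest[0]
--         n = 1
--         for b in rest[1:]:
--             if b != head:
--                 break
--             n += 1
--         parts.append((str(n) if n > 1 else "") + head)
--         rest = rest[n:]
--     return "".join(parts)
-- ===== Notes on version B (the rewrite author's own statement) =====
-- stated objective: alternative
-- what changed: A fuses slicing and counting in one per-block scan with mutable cur/rep state that decides at each block whether to flush; B stages the computation: it builds the block list, then consumes it run-at-a-time (measuring each whole run's length up front and jumping past it), collecting rendered runs into a list that is joined once.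
-- outside the precondition, e.g. on Compression(0, ''): A returns '', B raises ValueError
import Mathlib
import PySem

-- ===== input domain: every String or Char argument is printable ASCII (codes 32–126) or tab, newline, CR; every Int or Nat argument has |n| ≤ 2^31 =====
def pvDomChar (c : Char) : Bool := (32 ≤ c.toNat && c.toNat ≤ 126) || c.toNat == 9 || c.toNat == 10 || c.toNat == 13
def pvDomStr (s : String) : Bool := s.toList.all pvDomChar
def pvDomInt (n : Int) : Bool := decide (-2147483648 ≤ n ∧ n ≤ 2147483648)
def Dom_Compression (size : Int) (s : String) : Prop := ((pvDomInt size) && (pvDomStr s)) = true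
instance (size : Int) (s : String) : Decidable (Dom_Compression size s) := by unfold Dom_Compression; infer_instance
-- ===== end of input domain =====

-- B replaces A's fused per-block scan with mutable cur/rep state by a staged run-at-a-time
-- pass: build the block list, measure each run's length up front, jump past it, join the
-- rendered runs (objective: alternative decomposition, same O(n) cost).

-- ===== PORT A =====
-- A's while loop, ported on code points (PySem.Chars/List slice = Python string slicing);
-- fuel = s.length + 1 bounds the iterations (for size ≥ 1 the loop runs at most len(s) times;
-- the fuel-out branch just performs the same loop exit and is unreachable under Pre_).
def pvALoop (cs : List Char) (size : Int) :
    Nat → Int → List Char → Int → List Char → List Char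
  | 0, i, cur, rep, res =>
      (if rep ≠ 1 then res ++ PySem.Int.toChars rep ++ cur else res ++ cur) ++
        PySem.List.slice cs (some i) none
  | fuel + 1, i, cur, rep, res =>
      if i < (cs.length : Int) then
        if PySem.List.slice cs (some i) (some (i + size)) ≠ cur then
          pvALoop cs size fuel (i + size) (PySem.List.slice cs (some i) (some (i + size))) 1
            (if rep > 1 then res ++ PySem.Int.toChars rep ++ cur else res ++ cur)
        else
          pvALoop cs size fuel (i + size) cur (rep + 1) res
      else
        (if rep ≠ 1 then res ++ PySem.Int.toChars rep ++ cur else res ++ cur) ++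
          PySem.List.slice cs (some i) none

def Compression (size : Int) (s : String) : String :=
  String.ofList
    (pvALoop s.toList size (s.toList.length + 1) size
      (PySem.List.slice s.toList (some 0) (some size)) 1 [])

-- ===== PORT B =====
-- blocks = [s[i:i+size] for i in range(0, len(s), size)]
def pvBlocks (size : Int) (cs : List Char) : List (List Char) :=
  (PySem.List.pyRange 0 (cs.length : Int) size).map
    (fun i => PySem.List.slice cs (some i) (some (i + size)))

-- the inner for-loop with break: count how many leading blocks of tail equal head
def pvRunLen (head : List Char) : List (List Char) → Nat
  | [] => 0
  | b :: t => if b ≠ head then 0 else 1 + pvRunLen head t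

-- the outer while loop over rest, accumulating parts; rest[n:] with 1 ≤ n ≤ len(rest) is
-- exactly List.drop n (the index is nonnegative and in range, so Python's slice = drop)
def pvEncLoop (parts : List (List Char)) (rest : List (List Char)) : List (List Char) :=
  match rest with
  | [] => parts
  | head :: t =>
      let n : Nat := 1 + pvRunLen head t
      pvEncLoop (parts ++ [(if 1 < n then PySem.Int.toChars (n : Int) else []) ++ head])
        ((head :: t).drop n)
  termination_by rest.length
  decreasing_by simp only [List.length_drop, List.length_cons]; omega

def Compression_alt (size : Int) (s : String) : String :=
  String.ofList (PySem.Chars.join [] (pvEncLoop [] (pvBlocks size s.toList)))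

-- ===== PRECONDITION & SPEC =====
-- Pre_ excludes size < 1: there Python A diverges on every nonempty s (i never advances past
-- len(s)), and on the single returning input (size=0, s='') A accidentally returns '' while
-- B's range(0, 0, 0) raises ValueError.
def Pre_Compression (size : Int) (_s : String) : Prop := 1 ≤ size
instance (size : Int) (s : String) : Decidable (Pre_Compression size s) := by
  unfold Pre_Compression; infer_instance
def pvWitness_Compression : Int × String := (2, "aaabbcc")

def Spec_Compression (size : Int) (s : String) (out : String) : Prop := out = Compression_alt size s
instance (size : Int) (s : String) (out : String) : Decidable (Spec_Compression size s out) := by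
  unfold Spec_Compression; infer_instance

-- ===== CLAIM (what is proved, stated in full; the proofs are below) =====
def Claim_equal_Compression : Prop := ∀ (size : Int) (s : String),
  Dom_Compression size s → Pre_Compression size s → Spec_Compression size s (Compression size s)

-- ===== LEMMAS AND PROOFS =====

-- A's per-block loop state, abstracted over the block list: used as the meeting point of the
-- two proofs (A's loop reaches it directly; B's run-at-a-time loop is shown to compute it)
def pvEmit (cur : List Char) (rep : Int) : List Char :=
  (if rep ≠ 1 then PySem.Int.toChars rep else []) ++ cur

def pvEncodeRun : List Char → Int → List (List Char) → List Char
  | cur, rep, [] => pvEmit cur rep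
  | cur, rep, b :: t =>
      if b = cur then pvEncodeRun cur (rep + 1) t
      else pvEmit cur rep ++ pvEncodeRun b 1 t

theorem pvJoinNil (l : List (List Char)) : PySem.Chars.join [] l = l.flatten := by
  induction l with
  | nil => rfl
  | cons x xs ih =>
      simp only [PySem.Chars.join, List.intercalate] at *
      cases xs <;> simp_all

-- unfolding pyRange for a positive step
theorem pvRange_pos_cons (i n size : Int) (hs : 0 < size) (hin : i < n) :
    PySem.List.pyRange i n size = i :: PySem.List.pyRange (i + size) n size := by
  rw [PySem.List.pyRange_of_pos _ _ hs, PySem.List.pyRange_of_pos _ _ hs]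
  have hd : n - i + size - 1 = (n - (i + size) + size - 1) + size := by ring
  have h0 : 0 ≤ n - (i + size) + size - 1 := by omega
  have hc : ((n - i + size - 1) / size) = (n - (i + size) + size - 1) / size + 1 := by
    have := Int.add_mul_ediv_right (n - (i + size) + size - 1) 1 (by omega : size ≠ 0)
    rw [hd]
    simpa using this
  have hq0 : 0 ≤ (n - (i + size) + size - 1) / size := Int.ediv_nonneg h0 (by omega)
  have hcn : ((n - i + size - 1) / size).toNat
      = ((n - (i + size) + size - 1) / size).toNat + 1 := by omega
  by_cases h2 : i + size < n
  · simp only [if_pos hin, if_pos h2, hcn, List.range_succ_eq_map, List.map_cons, List.map_map]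
    congr 1
    · simp
    · apply List.map_congr_left; intro k _
      simp only [Function.comp]
      push_cast; ring
  · have hz : (n - (i + size) + size - 1) / size = 0 := by
      apply Int.ediv_eq_zero_of_lt h0; omega
    simp only [if_pos hin, if_neg h2, hcn, hz]
    simp
theorem pvRange_pos_nil (i n size : Int) (hs : 0 < size) (hin : ¬ i < n) :
    PySem.List.pyRange i n size = [] := by
  rw [PySem.List.pyRange_of_pos _ _ hs]
  simp [if_neg hin]

-- A-side invariant: A's loop from index i equals res ++ run-encoding of the remaining blocks,
-- seeded with the run (cur, rep) in progress
theorem pvLoop_eq (cs : List Char) (size : Int) (hs : 1 ≤ size) :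
    ∀ (fuel : Nat) (i : Int) (cur : List Char) (rep : Int) (res : List Char),
      0 ≤ i → ((cs.length : Int) - i).toNat ≤ fuel → 1 ≤ rep →
      pvALoop cs size fuel i cur rep res =
        res ++ pvEncodeRun cur rep
          ((PySem.List.pyRange i (cs.length : Int) size).map
            (fun j => PySem.List.slice cs (some j) (some (j + size)))) := by
  intro fuel
  induction fuel with
  | zero =>
      intro i cur rep res hi hfuel hrep
      have hin : ¬ i < (cs.length : Int) := by omega
      rw [pvRange_pos_nil i _ size (by omega) hin]
      simp only [pvALoop, List.map_nil, pvEncodeRun, pvEmit]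
      have hsl : PySem.List.slice cs (some i) none = [] := by
        rw [PySem.List.slice_from cs hi]
        apply List.drop_eq_nil_of_le; omega
      rw [hsl]
      split_ifs <;> simp
  | succ fuel ih =>
      intro i cur rep res hi hfuel hrep
      by_cases hin : i < (cs.length : Int)
      · rw [pvRange_pos_cons i _ size (by omega) hin]
        simp only [pvALoop, if_pos hin, List.map_cons]
        by_cases hc : PySem.List.slice cs (some i) (some (i + size)) = cur
        · rw [if_neg (by simpa using hc)]
          rw [ih (i + size) cur (rep + 1) res (by omega) (by omega) (by omega)]
          simp only [pvEncodeRun]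
          rw [if_pos hc]
        · rw [if_pos (by simpa using hc)]
          rw [ih (i + size) (PySem.List.slice cs (some i) (some (i + size))) 1 _
            (by omega) (by omega) (by omega)]
          simp only [pvEncodeRun, if_neg hc, pvEmit]
          split_ifs with h1 h2 h2 <;> simp [List.append_assoc] <;> omega
      · rw [pvRange_pos_nil i _ size (by omega) hin]
        simp only [pvALoop, if_neg hin, List.map_nil, pvEncodeRun, pvEmit]
        have hsl : PySem.List.slice cs (some i) none = [] := by
          rw [PySem.List.slice_from cs hi]
          apply List.drop_eq_nil_of_le; omega
        rw [hsl]
        split_ifs <;> simp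

-- B-side: one run-encoding step equals skipping the head's whole run at once
theorem pvEncodeRun_runlen (t : List (List Char)) :
    ∀ (cur : List Char) (rep : Int), 1 ≤ rep →
      pvEncodeRun cur rep t =
        (if rep + (pvRunLen cur t : Int) ≠ 1 then PySem.Int.toChars (rep + (pvRunLen cur t : Int)) else [])
          ++ cur ++
          (match t.drop (pvRunLen cur t) with
           | [] => []
           | b :: t' => pvEncodeRun b 1 t') := by
  induction t with
  | nil =>
      intro cur rep hrep
      simp [pvEncodeRun, pvEmit, pvRunLen]
  | cons b t ih =>
      intro cur rep hrep
      by_cases hb : b = cur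
      · subst hb
        have hrl : pvRunLen b (b :: t) = 1 + pvRunLen b t := by simp [pvRunLen]
        have hdrop : (b :: t).drop (1 + pvRunLen b t) = t.drop (pvRunLen b t) := by
          simp [Nat.add_comm 1 (pvRunLen b t), List.drop_succ_cons]
        have harith : rep + 1 + (pvRunLen b t : Int) = rep + ((1 + pvRunLen b t : Nat) : Int) := by
          push_cast; ring
        rw [hrl, hdrop]
        simp only [pvEncodeRun]
        rw [ih b (rep + 1) (by omega), harith]
        exact if_pos trivial
      · have hrl : pvRunLen cur (b :: t) = 0 := by simp [pvRunLen, hb]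
        rw [hrl]
        simp only [pvEncodeRun, if_neg hb, pvEmit, Nat.cast_zero, add_zero, List.drop_zero]

-- B-side invariant: the outer while loop flattens to parts ++ the run-encoding of rest
theorem pvEncLoop_eq (parts rest : List (List Char)) :
      (pvEncLoop parts rest).flatten =
        parts.flatten ++
          (match rest with
           | [] => []
           | head :: t => pvEncodeRun head 1 t) := by
  cases rest with
  | nil => simp [pvEncLoop]
  | cons head t =>
      rw [pvEncLoop]
      dsimp only
      rw [pvEncLoop_eq _ _, pvEncodeRun_runlen t head 1 (by omega)]
      have hdrop : (head :: t).drop (1 + pvRunLen head t) = t.drop (pvRunLen head t) := by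
        simp [Nat.add_comm 1 (pvRunLen head t), List.drop_succ_cons]
      rw [hdrop]
      by_cases h1 : 1 < 1 + pvRunLen head t
      · rw [if_pos h1, if_pos (by omega : (1:Int) + (pvRunLen head t : Int) ≠ 1)]
        have hcast : ((1 + pvRunLen head t : Nat) : Int) = 1 + (pvRunLen head t : Int) := by
          push_cast; ring
        simp [hcast, List.append_assoc]
      · rw [if_neg h1, if_neg (by omega : ¬ ((1:Int) + (pvRunLen head t : Int) ≠ 1))]
        simp [List.append_assoc]
  termination_by rest.length
  decreasing_by simp only [List.length_drop, List.length_cons]; omega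

-- ===== VERDICT (by name: the statement is the Claim_ definition above) =====
theorem Compression_spec : Claim_equal_Compression := by
  intro size s _ hpre
  have hs1 : (1:Int) ≤ size := hpre
  show Compression size s = Compression_alt size s
  unfold Compression Compression_alt pvBlocks
  generalize s.toList = cs
  congr 1
  rw [pvJoinNil, pvEncLoop_eq [] _]
  simp only [List.flatten_nil, List.nil_append]
  by_cases h0 : (0:Int) < (cs.length : Int)
  · rw [pvRange_pos_cons 0 _ size (by omega) h0]
    simp only [List.map_cons]
    rw [pvLoop_eq cs size hs1 (cs.length + 1) size
      (PySem.List.slice cs (some 0) (some size)) 1 []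
      (by omega) (by omega) (by omega)]
    simp [zero_add]
  · have hnil : cs = [] := by
      have : cs.length = 0 := by omega
      exact List.length_eq_zero_iff.mp this
    subst hnil
    rw [pvRange_pos_nil 0 _ size (by omega) h0]
    simp [pvALoop, PySem.List.slice, show ¬ (size < (0:Int)) by omega]
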